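-- pv_equiv track=rewrite | github.com/Abhi001vj/coding-interview-preparation | leetcode_discussion_google/Find minimum characters to remove to get unique string.py | min_remove_for_unique
-- ===== SOURCE A (Python) =====
-- def min_remove_for_unique(s: str) -> int:
--     """
--     Find minimum characters to remove for unique string
--     Uses sliding window to try all possible substrings
--
--     Visual example for "abcbb":
--     Window 1: a|bcbb -> can keep 'a'
--     Window 2: ab|cbb -> can keep 'ab'
--     Window 3: abc|bb -> can keep 'abc'
--     Window 4: abcb|b -> can't keep due to 'b'
--     Window 5: abcbb| -> can't keep due to 'b'
--     """
--     n = len(s)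
--     min_remove = n  # Worst case: remove all
--
--     def is_unique(counts):
--         """Check if character counts are all 0 or 1"""
--         return all(v <= 1 for v in counts.values())
--
--     # Try all possible windows
--     for i in range(n):
--         for j in range(i+1, n+1):
--             # Get substring to potentially remove
--             to_remove = s[i:j]
--
--             # Check remaining string
--             remaining = s[:i] + s[j:]
--             counts = {}
--             for c in remaining:
--                 counts[c] = counts.get(c, 0) + 1
--
--             # Update minimum if remaining is unique
--             if is_unique(counts):
--                 min_remove = min(min_remove, len(to_remove))
--
--     return min_remove
-- ===== SOURCE B (Python) =====
-- def min_remove_for_unique(s: str) -> int: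
--     # Prefix/suffix decomposition: the remainder after removing window s[i:j] is
--     # s[:i] + s[j:]; it is all-unique iff  i <= p (longest distinct prefix),
--     # s[j:] is distinct, and i <= first occurrence of every suffix char.
--     # One backward pass over suffix starts maximises the kept characters.
--     n = len(s)
--     if n == 0:
--         return 0
--     # longest all-distinct prefix length p
--     seen = set()
--     p = 0
--     while p < n and s[p] not in seen:
--         seen.add(s[p])
--         p += 1
--     # first-occurrence index of each character
--     first = {}
--     for idx, c in enumerate(s):
--         if c not in first:
--             first[c] = idx
--     best = 0
--     suffix = set()
--     limit = n  # min first-occurrence among current suffix chars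
--     for j in range(n, 0, -1):
--         # suffix == set(s[j:]) and s[j:] is all-distinct here
--         best = max(best, min(p, j - 1, limit) + (n - j))
--         if s[j - 1] in suffix:
--             break
--         suffix.add(s[j - 1])
--         limit = min(limit, first[s[j - 1]])
--     return n - best
-- ===== Notes on version B (the rewrite author's own statement) =====
-- stated objective: faster
-- what changed: A enumerates all O(n^2) removal windows and rebuilds a character-count dict for each remainder; B never enumerates windows: it precomputes the longest all-distinct prefix and each character's first-occurrence index, then a single backward pass over suffix starts maintains the suffix set and the minimum first-occurrence bound of the suffix characters, directly maximising the kept prefix+suffix characters.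
import Mathlib
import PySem

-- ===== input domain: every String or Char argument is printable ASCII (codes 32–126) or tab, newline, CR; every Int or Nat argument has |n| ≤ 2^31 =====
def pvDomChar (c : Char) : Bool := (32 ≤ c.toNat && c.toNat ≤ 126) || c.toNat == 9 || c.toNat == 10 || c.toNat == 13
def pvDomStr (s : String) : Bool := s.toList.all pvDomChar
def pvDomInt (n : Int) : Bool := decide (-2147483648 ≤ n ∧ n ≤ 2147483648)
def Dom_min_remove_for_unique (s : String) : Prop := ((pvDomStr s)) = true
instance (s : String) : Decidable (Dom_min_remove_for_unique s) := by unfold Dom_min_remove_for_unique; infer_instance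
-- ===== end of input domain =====

-- B replaces A's brute force over all removal windows by a prefix/suffix decomposition:
-- precompute the longest all-distinct prefix and first-occurrence indices, then a single
-- backward pass over suffix starts maximises the number of kept characters (objective: faster).

-- ===== PORT A =====
-- counts-building loop of A ('for c in remaining: counts[c] = counts.get(c, 0) + 1')
def pvCountsA (t : List Char) : PySem.Dict Char Int :=
  t.foldl (fun d c => d.insert c (d.getD c 0 + 1)) PySem.Dict.empty

-- A's helper is_unique: 'all(v <= 1 for v in counts.values())'
def pvIsUniqueA (counts : PySem.Dict Char Int) : Bool :=
  counts.values.all (fun v => decide (v ≤ 1))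

def min_remove_for_unique (s : String) : Int :=
  let cs := s.toList
  let n : Int := cs.length
  (PySem.List.pyRange 0 n 1).foldl (fun m i =>
    (PySem.List.pyRange (i + 1) (n + 1) 1).foldl (fun m j =>
      let to_remove := PySem.List.slice cs (some i) (some j)
      let remaining := PySem.List.slice cs none (some i) ++ PySem.List.slice cs (some j) none
      let counts := pvCountsA remaining
      if pvIsUniqueA counts then min m (to_remove.length : Int) else m) m) n

-- ===== PORT B =====
-- B's while loop 'while p < n and s[p] not in seen: seen.add(s[p]); p += 1' as the obvious
-- structural recursion over the not-yet-scanned characters (returns the count of steps taken = p)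
def pvPrefB (seen : PySem.Set Char) : List Char → Nat
  | [] => 0
  | c :: rest =>
    if PySem.Set.contains seen c then 0 else pvPrefB (PySem.Set.add seen c) rest + 1

-- 'first = {}; for idx, c in enumerate(s): if c not in first: first[c] = idx'
def pvFirstB (cs : List Char) : PySem.Dict Char Int :=
  (PySem.List.enumerate cs).foldl
    (fun d p => if d.contains p.2 then d else d.insert p.2 p.1) PySem.Dict.empty

-- 'for j in range(n, 0, -1): best = max(best, min(p, j-1, limit) + (n-j)); if s[j-1] in suffix:
--  break; suffix.add(s[j-1]); limit = min(limit, first[s[j-1]])' — the Nat argument is the loop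
-- variable j; s[j-1] is an in-range access (1 ≤ j ≤ n) and first[s[j-1]] a present key
def pvLoopB (cs : List Char) (first : PySem.Dict Char Int) (p n : Int) :
    Nat → Int → PySem.Set Char → Int → Int
  | 0, best, _, _ => best
  | jm + 1, best, suffix, limit =>
    let j : Int := (jm : Int) + 1
    let best' := max best (min (min p (j - 1)) limit + (n - j))
    let c := cs.getD jm ' '
    if PySem.Set.contains suffix c then best'
    else pvLoopB cs first p n jm best' (PySem.Set.add suffix c) (min limit (first.getD c 0))

def min_remove_for_unique_alt (s : String) : Int :=
  let cs := s.toList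
  let n : Int := cs.length
  if cs.length = 0 then 0
  else
    let p : Int := (pvPrefB PySem.Set.empty cs : Int)
    let first := pvFirstB cs
    n - pvLoopB cs first p n cs.length 0 PySem.Set.empty n

-- ===== PRECONDITION & SPEC =====
def Spec_min_remove_for_unique (s : String) (out : Int) : Prop := out = min_remove_for_unique_alt s
instance (s : String) (out : Int) : Decidable (Spec_min_remove_for_unique s out) := by unfold Spec_min_remove_for_unique; infer_instance

-- ===== CLAIM (what is proved, stated in full; the proofs are below) =====
def Claim_equal_min_remove_for_unique : Prop := ∀ (s : String), Dom_min_remove_for_unique s → Spec_min_remove_for_unique s (min_remove_for_unique s)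

-- ===== LEMMAS AND PROOFS =====

-- ---------- A-side: characterisation of the double fold ----------

theorem pvCountsA_iff (t : List Char) : pvIsUniqueA (pvCountsA t) = true ↔ t.Nodup := by
  unfold pvIsUniqueA pvCountsA
  rw [PySem.Dict.foldl_insert_getD_add_one_eq_counter,
    PySem.Dict.values_eq_map_keys _ (PySem.Dict.nodup_keys_counter t) 0,
    PySem.Dict.keys_counter]
  simp only [List.all_map, List.all_eq_true, Function.comp,
    PySem.Dict.getD_counter, PySem.Set.mem_ofList, decide_eq_true_eq]
  rw [List.nodup_iff_count_le_one]
  constructor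
  · intro h a
    by_cases ha : a ∈ t
    · have := h a ha; exact_mod_cast (by exact_mod_cast this : (t.count a : Int) ≤ 1)
    · simp [List.count_eq_zero_of_not_mem ha]
  · intro h a _
    exact_mod_cast h a

theorem pvFoldl_le_init {α : Type} (g : Int → α → Int) (l : List α)
    (hle : ∀ m, ∀ a ∈ l, g m a ≤ m) (init : Int) : l.foldl g init ≤ init := by
  induction l generalizing init with
  | nil => simp
  | cons a t ih =>
    exact le_trans (ih (fun m b hb => hle m b (by simp [hb])) (g init a))
      (hle init a (by simp))

theorem pvFoldl_le_elem {α : Type} (g : Int → α → Int) (l : List α)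
    (hle : ∀ m, ∀ a ∈ l, g m a ≤ m) (init : Int) (x : α) (c : Int) (hx : x ∈ l)
    (hb : ∀ m, g m x ≤ c) : l.foldl g init ≤ c := by
  induction l generalizing init with
  | nil => cases hx
  | cons a t ih =>
    have hle' : ∀ m, ∀ b ∈ t, g m b ≤ m := fun m b hb' => hle m b (by simp [hb'])
    rcases List.mem_cons.mp hx with rfl | hx'
    · exact le_trans (pvFoldl_le_init g t hle' (g init x)) (hb init)
    · exact ih hle' hx' (init := g init a)

theorem pvFoldl_cases {α : Type} (g : Int → α → Int) (Q : Int → Prop) (l : List α)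
    (hc : ∀ m, ∀ a ∈ l, g m a = m ∨ Q (g m a)) (init : Int) :
    l.foldl g init = init ∨ Q (l.foldl g init) := by
  induction l generalizing init with
  | nil => left; rfl
  | cons a t ih =>
    rcases ih (fun m b hb => hc m b (by simp [hb])) (g init a) with h | h
    · rw [List.foldl_cons, h]; exact hc init a (by simp)
    · right; exact h

theorem pvCondA_iff (cs : List Char) (i j : Nat) :
    pvIsUniqueA (pvCountsA (PySem.List.slice cs none (some (i : Int)) ++
      PySem.List.slice cs (some (j : Int)) none)) = true ↔
    (cs.take i ++ cs.drop j).Nodup := by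
  rw [PySem.List.slice_to_natCast, PySem.List.slice_from_natCast, pvCountsA_iff]

theorem pvLenSlice (cs : List Char) (i j : Nat) (hij : i ≤ j) (hj : j ≤ cs.length) :
    ((PySem.List.slice cs (some (i : Int)) (some (j : Int))).length : Int)
      = (j : Int) - (i : Int) := by
  rw [PySem.List.slice_natCast]
  simp only [List.length_take, List.length_drop]
  omega

theorem pvA_le (s : String) (i j : Nat) (hij : i < j) (hj : j ≤ s.toList.length)
    (hu : (s.toList.take i ++ s.toList.drop j).Nodup) :
    min_remove_for_unique s ≤ ((j : Int) - (i : Int)) := by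
  unfold min_remove_for_unique
  set cs := s.toList with hcs
  refine pvFoldl_le_elem _ _ ?_ _ ((i : Int)) ((j : Int) - (i : Int)) ?_ ?_
  · intro m a _
    refine pvFoldl_le_init _ _ ?_ m
    intro m' b _
    dsimp only
    split_ifs with h
    · exact min_le_left _ _
    · exact le_refl m'
  · rw [PySem.List.mem_pyRange_one]
    constructor <;> [positivity; exact_mod_cast lt_of_lt_of_le hij hj]
  · intro m
    refine pvFoldl_le_elem _ _ ?_ m ((j : Int)) _ ?_ ?_
    · intro m' b _
      dsimp only
      split_ifs with h
      · exact min_le_left _ _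
      · exact le_refl m'
    · rw [PySem.List.mem_pyRange_one]
      constructor
      · exact_mod_cast hij
      · exact_mod_cast Nat.lt_succ_of_le hj
    · intro m'
      dsimp only
      rw [if_pos ((pvCondA_iff cs i j).mpr hu)]
      rw [← pvLenSlice cs i j (le_of_lt hij) hj]
      exact min_le_right _ _

theorem pvA_cases (s : String) :
    min_remove_for_unique s = (s.toList.length : Int) ∨
    ∃ i j : Nat, i < j ∧ j ≤ s.toList.length ∧ (s.toList.take i ++ s.toList.drop j).Nodup ∧
      min_remove_for_unique s = ((j : Int) - (i : Int)) := by
  unfold min_remove_for_unique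
  set cs := s.toList with hcs
  refine pvFoldl_cases _
    (fun r => ∃ i j : Nat, i < j ∧ j ≤ cs.length ∧ (cs.take i ++ cs.drop j).Nodup ∧
      r = ((j : Int) - (i : Int))) _ ?_ _
  intro m a ha
  have hmema := (PySem.List.mem_pyRange_one).mp ha
  dsimp only
  refine pvFoldl_cases _ (fun r => ∃ i j : Nat, i < j ∧ j ≤ cs.length ∧
    (cs.take i ++ cs.drop j).Nodup ∧ r = ((j : Int) - (i : Int))) _ ?_ m
  intro m' b hb
  have hmemb := (PySem.List.mem_pyRange_one).mp hb
  dsimp only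
  split_ifs with hcond
  · rcases min_choice m' ((PySem.List.slice cs (some a) (some b)).length : Int) with h | h
    · left; exact h
    · right
      have ha' : a = ((a.toNat : Nat) : Int) := by omega
      have hb' : b = ((b.toNat : Nat) : Int) := by omega
      refine ⟨a.toNat, b.toNat, by omega, by omega, ?_, ?_⟩
      · have := hcond
        rw [ha', hb'] at this
        exact (pvCondA_iff cs a.toNat b.toNat).mp this
      · rw [h, ha', hb', pvLenSlice cs a.toNat b.toNat (by omega) (by omega)]
        simp
  · left; rfl

-- ---------- B-side: spec helpers ----------

-- min over the suffix chars of their first-occurrence index (n when the suffix is empty)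
def pvLimit (cs : List Char) (j : Nat) : Int :=
  (cs.drop j).foldr (fun c m => min ((cs.idxOf c : Int)) m) ((cs.length : Int))

-- kept characters when removing s[i:j] with the best feasible i for this j
def pvKeep (cs : List Char) (p : Int) (j : Nat) : Int :=
  min (min p ((j : Int) - 1)) (pvLimit cs j) + ((cs.length : Int) - (j : Int))

theorem pvLe_foldr_min (f : Char → Int) (l : List Char) (init i : Int) :
    i ≤ l.foldr (fun c m => min (f c) m) init ↔ i ≤ init ∧ ∀ c ∈ l, i ≤ f c := by
  induction l with
  | nil => simp
  | cons a t ih => simp [ih]; tauto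

theorem pvLimit_nonneg (cs : List Char) (j : Nat) : 0 ≤ pvLimit cs j := by
  rw [pvLimit, pvLe_foldr_min]
  exact ⟨by positivity, fun c _ => by positivity⟩

theorem pvLimit_drop_nil (cs : List Char) (j : Nat) (h : cs.drop j = []) :
    pvLimit cs j = (cs.length : Int) := by
  rw [pvLimit, h]; rfl

theorem pvLimit_cons (cs : List Char) (j : Nat) (h : j < cs.length) :
    pvLimit cs j = min ((cs.idxOf cs[j] : Int)) (pvLimit cs (j + 1)) := by
  rw [pvLimit, List.drop_eq_getElem_cons h, List.foldr_cons]; rfl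

theorem pvDisj_iff (cs : List Char) (i j : Nat) (hi : i ≤ cs.length) :
    (∀ c ∈ cs.drop j, c ∉ cs.take i) ↔ (i : Int) ≤ pvLimit cs j := by
  rw [pvLimit, pvLe_foldr_min]
  constructor
  · intro h
    refine ⟨by exact_mod_cast hi, fun c hc => ?_⟩
    have hcs : c ∈ cs := List.mem_of_mem_drop hc
    have h2 := h c hc
    rw [List.mem_take_iff_idxOf_lt hcs] at h2
    omega
  · rintro ⟨-, h⟩ c hc hmem
    have hcs : c ∈ cs := List.mem_of_mem_drop hc
    have h2 := (List.mem_take_iff_idxOf_lt hcs).mp hmem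
    have h3 := h c hc
    omega

-- ---------- B-side: the prefix scan ----------

theorem pvPrefB_spec (l : List Char) : ∀ (seen : PySem.Set Char) (pre : List Char),
    (∀ c, PySem.Set.contains seen c = true ↔ c ∈ pre) → pre.Nodup →
    (pre ++ l.take (pvPrefB seen l)).Nodup ∧ pvPrefB seen l ≤ l.length ∧
    ∀ i, i ≤ l.length → (pre ++ l.take i).Nodup → i ≤ pvPrefB seen l := by
  induction l with
  | nil =>
    intro seen pre h hnd
    refine ⟨by simpa [pvPrefB], by simp [pvPrefB], fun i hi _ => ?_⟩
    simp only [List.length_nil, Nat.le_zero] at hi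
    simp [hi]
  | cons c rest ih =>
    intro seen pre h hnd
    by_cases hc : PySem.Set.contains seen c = true
    · rw [pvPrefB, if_pos hc]
      refine ⟨by simpa, by simp, ?_⟩
      intro i hi hnodup
      by_contra hgt
      have hi1 : 1 ≤ i := by omega
      have hcpre : c ∈ pre := (h c).mp hc
      have hctake : c ∈ (c :: rest).take i := by
        cases i with
        | zero => omega
        | succ i' => simp
      exact (List.disjoint_of_nodup_append hnodup) hcpre hctake
    · rw [pvPrefB, if_neg hc]
      have hcpre : c ∉ pre := fun hh => hc ((h c).mpr hh)
      have h' : ∀ x, PySem.Set.contains (PySem.Set.add seen c) x = true ↔ x ∈ pre ++ [c] := by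
        intro x
        rw [PySem.Set.contains_iff, PySem.Set.mem_add]
        rw [← PySem.Set.contains_iff, h x]
        simp [or_comm]
      have hnd' : (pre ++ [c]).Nodup := by
        rw [List.nodup_append]
        refine ⟨hnd, List.nodup_singleton c, ?_⟩
        intro a ha b hb
        rw [List.mem_singleton] at hb
        subst hb
        exact fun he => hcpre (he ▸ ha)
      obtain ⟨H1, H2, H3⟩ := ih (PySem.Set.add seen c) (pre ++ [c]) h' hnd'
      refine ⟨?_, by simpa using Nat.succ_le_succ H2, ?_⟩
      · simpa [List.append_assoc] using H1
      · intro i hi hnodup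
        cases i with
        | zero => omega
        | succ i' =>
          have := H3 i' (by simpa using hi) (by simpa [List.append_assoc] using hnodup)
          omega

theorem pvTake_nodup_iff (cs : List Char) (i : Nat) (hi : i ≤ cs.length) :
    (cs.take i).Nodup ↔ i ≤ pvPrefB PySem.Set.empty cs := by
  obtain ⟨H1, H2, H3⟩ := pvPrefB_spec cs PySem.Set.empty []
    (by intro c; simp [PySem.Set.empty]) (by simp)
  constructor
  · intro h
    exact H3 i hi (by simpa using h)
  · intro h
    have hx : cs.take i = (cs.take (pvPrefB PySem.Set.empty cs)).take i := by
      rw [List.take_take, Nat.min_eq_left h]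
    rw [hx]
    exact (List.take_sublist _ _).nodup (by simpa using H1)

-- ---------- B-side: the first-occurrence dict ----------

theorem pvFirst_preserve (l : List (Int × Char)) : ∀ (d : PySem.Dict Char Int) (c : Char),
    d.contains c = true →
    (l.foldl (fun d p => if d.contains p.2 then d else d.insert p.2 p.1) d).get? c = d.get? c := by
  induction l with
  | nil => intro d c _; rfl
  | cons q t ih =>
    intro d c hc
    rw [List.foldl_cons]
    by_cases hq : d.contains q.2 = true
    · rw [if_pos hq]; exact ih d c hc
    · rw [if_neg (by simpa using hq)]
      have hne : q.2 ≠ c := fun he => hq (he ▸ hc)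
      have hc' : (d.insert q.2 q.1).contains c = true := by
        rw [PySem.Dict.contains_eq_isSome_get?, PySem.Dict.get?_insert_of_ne _ _ (Ne.symm hne),
          ← PySem.Dict.contains_eq_isSome_get?]
        exact hc
      rw [ih _ c hc', PySem.Dict.get?_insert_of_ne _ _ (Ne.symm hne)]

theorem pvFirstB_loop (cs : List Char) (c : Char) : ∀ (k : Int) (d : PySem.Dict Char Int),
    d.contains c = false → c ∈ cs →
    ((PySem.List.enumerate cs k).foldl
        (fun d p => if d.contains p.2 then d else d.insert p.2 p.1) d).get? c
      = some (k + (cs.idxOf c : Int)) := by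
  induction cs with
  | nil => intro k d _ hmem; cases hmem
  | cons a rest ih =>
    intro k d hdc hmem
    have henum : PySem.List.enumerate (a :: rest) k = (k, a) :: PySem.List.enumerate rest (k + 1) := rfl
    rw [henum, List.foldl_cons]
    by_cases hac : a = c
    · subst hac
      rw [if_neg (by simpa using hdc)]
      have hcont : (d.insert a k).contains a = true := by
        rw [PySem.Dict.contains_eq_isSome_get?, PySem.Dict.get?_insert_self]; rfl
      rw [pvFirst_preserve _ _ _ hcont, PySem.Dict.get?_insert_self]
      simp
    · have hmem' : c ∈ rest := by
        rcases List.mem_cons.mp hmem with h | h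
        · exact absurd h.symm hac
        · exact h
      have hidx : ((a :: rest).idxOf c : Int) = (rest.idxOf c : Int) + 1 := by
        simp [hac]
      by_cases hda : d.contains a = true
      · rw [if_pos hda, ih (k + 1) d hdc hmem']
        congr 1
        omega
      · rw [if_neg (by simpa using hda)]
        have hc' : (d.insert a k).contains c = false := by
          rw [PySem.Dict.contains_eq_isSome_get?, PySem.Dict.get?_insert_of_ne _ _ (Ne.symm hac),
            ← PySem.Dict.contains_eq_isSome_get?]
          exact hdc
        rw [ih (k + 1) _ hc' hmem']
        congr 1
        omega

theorem pvFirstB_getD (cs : List Char) (c : Char) (h : c ∈ cs) :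
    (pvFirstB cs).getD c 0 = (cs.idxOf c : Int) := by
  unfold pvFirstB
  rw [PySem.Dict.getD_eq_get?_getD,
    pvFirstB_loop cs c 0 PySem.Dict.empty (by rfl) h]
  simp

-- ---------- B-side: the backward loop ----------

theorem pvLoopB_spec (cs : List Char) (p : Int) :
    ∀ (jm : Nat) (best : Int) (suffix : PySem.Set Char) (limit : Int),
      jm ≤ cs.length →
      (∀ x, PySem.Set.contains suffix x = true ↔ x ∈ cs.drop jm) →
      limit = pvLimit cs jm →
      (cs.drop jm).Nodup →
      best ≤ pvLoopB cs (pvFirstB cs) p (cs.length : Int) jm best suffix limit ∧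
      (∀ j', 1 ≤ j' → j' ≤ jm → (cs.drop j').Nodup →
        pvKeep cs p j' ≤ pvLoopB cs (pvFirstB cs) p (cs.length : Int) jm best suffix limit) ∧
      (pvLoopB cs (pvFirstB cs) p (cs.length : Int) jm best suffix limit = best ∨
        ∃ j', 1 ≤ j' ∧ j' ≤ jm ∧ (cs.drop j').Nodup ∧
          pvLoopB cs (pvFirstB cs) p (cs.length : Int) jm best suffix limit = pvKeep cs p j') := by
  intro jm
  induction jm with
  | zero =>
    intro best suffix limit _ _ _ _
    exact ⟨le_refl _, fun j' h1 h2 _ => by omega, Or.inl rfl⟩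
  | succ m ih =>
    intro best suffix limit hlen hsuf hlim hnd
    have hm : m < cs.length := by omega
    have hc : cs.getD m ' ' = cs[m] := List.getD_eq_getElem cs ' ' hm
    have hdropm : cs.drop m = cs[m] :: cs.drop (m + 1) := List.drop_eq_getElem_cons hm
    have hkeep : min (min p (((m : Nat) : Int) + 1 - 1)) limit
        + ((cs.length : Int) - ((m : Nat) + 1)) = pvKeep cs p (m + 1) := by
      rw [hlim, pvKeep]
      push_cast
      ring_nf
    rw [pvLoopB]
    simp only [hc]
    by_cases hin : PySem.Set.contains suffix cs[m] = true
    · rw [if_pos hin]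
      have hcm : cs[m] ∈ cs.drop (m + 1) := (hsuf cs[m]).mp hin
      have hnotless : ∀ j', 1 ≤ j' → j' ≤ m → ¬ (cs.drop j').Nodup := by
        intro j' _ hj' hnd'
        have hsub : cs.drop m = (cs.drop j').drop (m - j') := by
          rw [List.drop_drop]
          congr 1
          omega
        have : (cs.drop m).Nodup := by
          rw [hsub]
          exact hnd'.sublist (List.drop_sublist _ _)
        rw [hdropm, List.nodup_cons] at this
        exact this.1 hcm
      refine ⟨le_max_left _ _, ?_, ?_⟩
      · intro j' h1 h2 hnd'
        rcases Nat.lt_or_ge j' (m + 1) with h | h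
        · exact absurd hnd' (hnotless j' h1 (by omega))
        · have : j' = m + 1 := by omega
          subst this
          rw [← hkeep]
          exact le_max_right _ _
      · rcases max_choice best (min (min p (((m : Nat) : Int) + 1 - 1)) limit
          + ((cs.length : Int) - ((m : Nat) + 1))) with h | h
        · exact Or.inl h
        · exact Or.inr ⟨m + 1, by omega, le_refl _, hnd, by rw [h, hkeep]⟩
    · rw [if_neg hin]
      have hnotin : cs[m] ∉ cs.drop (m + 1) := fun hh => hin ((hsuf cs[m]).mpr hh)
      have hsuf' : ∀ x, PySem.Set.contains (PySem.Set.add suffix cs[m]) x = true ↔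
          x ∈ cs.drop m := by
        intro x
        rw [PySem.Set.contains_iff, PySem.Set.mem_add, ← PySem.Set.contains_iff, hsuf x,
          hdropm, List.mem_cons]
        tauto
      have hlim' : min limit ((pvFirstB cs).getD cs[m] 0) = pvLimit cs m := by
        rw [hlim, pvFirstB_getD cs cs[m] (List.getElem_mem hm), pvLimit_cons cs m hm,
          min_comm]
      have hnd' : (cs.drop m).Nodup := by
        rw [hdropm, List.nodup_cons]
        exact ⟨hnotin, hnd⟩
      obtain ⟨I1, I2, I3⟩ := ih (max best (min (min p (((m : Nat) : Int) + 1 - 1)) limit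
          + ((cs.length : Int) - ((m : Nat) + 1)))) (PySem.Set.add suffix cs[m])
        (min limit ((pvFirstB cs).getD cs[m] 0)) (by omega) hsuf' hlim' hnd'
      refine ⟨le_trans (le_max_left _ _) I1, ?_, ?_⟩
      · intro j' h1 h2 hnd''
        rcases Nat.lt_or_ge j' (m + 1) with hlt | hge
        · exact I2 j' h1 (by omega) hnd''
        · have hj : j' = m + 1 := by omega
          subst hj
          refine le_trans ?_ I1
          rw [← hkeep]
          exact le_max_right _ _
      · rcases I3 with h | ⟨j', hj1, hj2, hjn, hj⟩
        · rcases max_choice best (min (min p (((m : Nat) : Int) + 1 - 1)) limit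
            + ((cs.length : Int) - ((m : Nat) + 1))) with h2 | h2
          · exact Or.inl (by rw [h, h2])
          · exact Or.inr ⟨m + 1, by omega, le_refl _, hnd, by rw [h, h2, hkeep]⟩
        · exact Or.inr ⟨j', hj1, by omega, hjn, hj⟩

-- ===== VERDICT (by name: the statement is the Claim_ definition above) =====
theorem min_remove_for_unique_spec : Claim_equal_min_remove_for_unique := by
  intro s _
  show min_remove_for_unique s = min_remove_for_unique_alt s
  by_cases hnil : s.toList = []
  · unfold min_remove_for_unique min_remove_for_unique_alt
    dsimp only
    rw [hnil]
    rfl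
  · set cs := s.toList with hcs
    have hn1 : 1 ≤ cs.length := List.length_pos_of_ne_nil hnil
    set P := pvPrefB PySem.Set.empty cs with hPdef
    set p : Int := (P : Int) with hpdef
    have hp0 : 0 ≤ p := Int.natCast_nonneg P
    have hBval : min_remove_for_unique_alt s = (cs.length : Int) -
        pvLoopB cs (pvFirstB cs) p (cs.length : Int) cs.length 0 PySem.Set.empty
          (cs.length : Int) := by
      unfold min_remove_for_unique_alt
      dsimp only
      rw [← hcs, if_neg (by omega)]
    obtain ⟨H1, H2, H3⟩ := pvLoopB_spec cs p cs.length 0 PySem.Set.empty ((cs.length : Int))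
      (le_refl _)
      (by intro x
          rw [PySem.Set.contains_iff, List.drop_length]
          simp [PySem.Set.empty])
      (pvLimit_drop_nil cs cs.length (List.drop_length)).symm
      (by rw [List.drop_length]; exact List.nodup_nil)
    set bestB := pvLoopB cs (pvFirstB cs) p (cs.length : Int) cs.length 0 PySem.Set.empty
      (cs.length : Int) with hbB
    -- A ≤ n - bestB
    have hle : min_remove_for_unique s ≤ (cs.length : Int) - bestB := by
      rcases H3 with h0 | ⟨j', hj1, hj2, hjn, hj⟩
      · have := pvA_le s 0 cs.length hn1 (le_refl _)
          (by rw [List.take_zero, List.nil_append, List.drop_length]; exact List.nodup_nil)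
        rw [h0]
        simpa using this
      · have hm0 : 0 ≤ min (min p ((j' : Int) - 1)) (pvLimit cs j') :=
          le_min (le_min hp0 (by omega)) (pvLimit_nonneg cs j')
        set istar := (min (min p ((j' : Int) - 1)) (pvLimit cs j')).toNat with histar
        have hicast : (istar : Int) = min (min p ((j' : Int) - 1)) (pvLimit cs j') := by omega
        have hij : istar < j' := by
          have : (istar : Int) ≤ (j' : Int) - 1 := hicast ▸ le_trans (min_le_left _ _) (min_le_right _ _)
          omega
        have hiP : istar ≤ P := by
          have : (istar : Int) ≤ p := hicast ▸ le_trans (min_le_left _ _) (min_le_left _ _)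
          rw [hpdef] at this
          exact_mod_cast this
        have hilim : (istar : Int) ≤ pvLimit cs j' := hicast ▸ min_le_right _ _
        have hnodup : (cs.take istar ++ cs.drop j').Nodup := by
          refine List.Nodup.append ?_ hjn ?_
          · exact (pvTake_nodup_iff cs istar (by omega)).mpr hiP
          · exact List.disjoint_right.mpr ((pvDisj_iff cs istar j' (by omega)).mpr hilim)
        have hA := pvA_le s istar j' hij hj2 hnodup
        have hkv : bestB = (istar : Int) + ((cs.length : Int) - (j' : Int)) := by
          rw [hj, pvKeep, hicast]
        omega
    -- n - bestB ≤ A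
    have hge : (cs.length : Int) - bestB ≤ min_remove_for_unique s := by
      rcases pvA_cases s with h | ⟨i, j, hij, hjle, hnodup, hA⟩
      · rw [← hcs] at h
        rw [h]; omega
      · rw [← hcs] at hjle hnodup
        have htake : (cs.take i).Nodup := (List.nodup_append.mp hnodup).1
        have hdrop : (cs.drop j).Nodup := (List.nodup_append.mp hnodup).2.1
        have hdisj : (i : Int) ≤ pvLimit cs j := by
          refine (pvDisj_iff cs i j (by omega)).mp ?_
          exact List.disjoint_right.mp (List.disjoint_of_nodup_append hnodup)
        have hiP : i ≤ P := (pvTake_nodup_iff cs i (by omega)).mp htake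
        have hK := H2 j (by omega) hjle hdrop
        have hKge : (i : Int) + ((cs.length : Int) - (j : Int)) ≤ pvKeep cs p j := by
          rw [pvKeep]
          have h1 : (i : Int) ≤ min (min p ((j : Int) - 1)) (pvLimit cs j) :=
            le_min (le_min (by rw [hpdef]; exact_mod_cast hiP) (by omega)) hdisj
          omega
        rw [hA]
        omega
    rw [hBval]
    omega
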